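-- pv_equiv track=rewrite | github.com/embydextrous/Interview | arrays/miscellaneous/5-countSubArraysWithProductK.py | countSubArraysWithAllOnes
-- ===== SOURCE A (Python) =====
-- def countSubArraysWithAllOnes(a):
--     n = len(a)
--     count = 0
--     l, r = 0, 0
--     while r < n:
--         if a[r] == 1:
--             while r < n and a[r] == 1:
--                 r += 1
--             count += ((r - l) * (r - l + 1)) // 2
--             l = r
--         else:
--             l += 1
--             r += 1
--     return count
-- ===== SOURCE B (Python) =====
-- def countSubArraysWithAllOnes(a):
--     count = 0
--     run = 0
--     for x in a:
--         if x == 1: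
--             run += 1
--             count += run
--         else:
--             run = 0
--     return count
-- ===== Notes on version B (the rewrite author's own statement) =====
-- stated objective: simpler
-- what changed: Replaces the two-pointer scan that detects maximal runs of 1s and adds k*(k+1)//2 per run by a single flat loop that keeps the current run length and adds it to the count at every 1.
import Mathlib
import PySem

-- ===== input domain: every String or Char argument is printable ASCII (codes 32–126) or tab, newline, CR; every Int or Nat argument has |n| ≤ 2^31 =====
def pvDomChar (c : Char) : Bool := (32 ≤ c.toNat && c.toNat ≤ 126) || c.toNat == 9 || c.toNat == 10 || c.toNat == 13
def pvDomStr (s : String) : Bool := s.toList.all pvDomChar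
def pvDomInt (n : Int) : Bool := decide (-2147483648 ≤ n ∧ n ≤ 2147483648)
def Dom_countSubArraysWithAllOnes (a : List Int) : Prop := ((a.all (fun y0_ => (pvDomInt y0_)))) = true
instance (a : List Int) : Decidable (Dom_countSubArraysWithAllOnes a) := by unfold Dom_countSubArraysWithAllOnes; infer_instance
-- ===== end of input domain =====

-- B replaces A's two-pointer maximal-run scan with triangular-number bursts by a single
-- flat loop maintaining the current run length; objective: simpler.

-- ===== PORT A =====
-- Inner `while r < n and a[r] == 1: r += 1` of A.  Indices are Nat (they start at 0 and
-- only increase in A, so this is exact); `a.getD r 0` is Python's `a[r]`, exact since r < n.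
def pvAInner (a : List Int) (r : Nat) : Nat :=
  if r < a.length ∧ a.getD r 0 == 1 then pvAInner a (r + 1) else r
termination_by a.length - r
decreasing_by omega

lemma pvAInner_ge (a : List Int) (r : Nat) : r ≤ pvAInner a r := by
  rw [pvAInner]
  split
  · exact le_trans (by omega) (pvAInner_ge a (r + 1))
  · exact le_refl r
termination_by a.length - r
decreasing_by rename_i h; omega

-- Outer while-loop of A, with state (count, l, r).  The count increment
-- `((r - l) * (r - l + 1)) // 2` is exact in Nat arithmetic because l ≤ r' holds at
-- that point and the operands are nonnegative (Python // = Nat / there).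
def pvAOuter (a : List Int) (count : Int) (l r : Nat) : Int :=
  if r < a.length then
    if a.getD r 0 == 1 then
      pvAOuter a (count + ((pvAInner a r - l) * (pvAInner a r - l + 1)) / 2)
        (pvAInner a r) (pvAInner a r)
    else
      pvAOuter a count (l + 1) (r + 1)
  else count
termination_by a.length - r
decreasing_by
  · have h1 : r + 1 ≤ pvAInner a (r + 1) := pvAInner_ge a (r + 1)
    have h2 : pvAInner a r = pvAInner a (r + 1) := by
      rw [pvAInner]; simp_all
    omega
  · omega

def countSubArraysWithAllOnes (a : List Int) : Int := pvAOuter a 0 0 0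

-- ===== PORT B =====
-- One step of B's loop over the state (count, run).
def pvBStep (s : Int × Int) (x : Int) : Int × Int :=
  if x == 1 then (s.1 + (s.2 + 1), s.2 + 1) else (s.1, 0)

def countSubArraysWithAllOnes_alt (a : List Int) : Int :=
  (a.foldl pvBStep (0, 0)).1

-- ===== PRECONDITION & SPEC =====
def Spec_countSubArraysWithAllOnes (a : List Int) (out : Int) : Prop := out = countSubArraysWithAllOnes_alt a
instance (a : List Int) (out : Int) : Decidable (Spec_countSubArraysWithAllOnes a out) := by unfold Spec_countSubArraysWithAllOnes; infer_instance

-- ===== CLAIM (what is proved, stated in full; the proofs are below) =====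
def Claim_equal_countSubArraysWithAllOnes : Prop := ∀ (a : List Int), Dom_countSubArraysWithAllOnes a → Spec_countSubArraysWithAllOnes a (countSubArraysWithAllOnes a)

-- ===== LEMMAS AND PROOFS =====

def pvTri : Nat → Nat
  | 0 => 0
  | k + 1 => pvTri k + (k + 1)

lemma pvTri_two_mul (k : Nat) : 2 * pvTri k = k * (k + 1) := by
  induction k with
  | zero => rfl
  | succ k ih => simp [pvTri]; ring_nf; ring_nf at ih; omega

lemma pvAInner_le (a : List Int) (r : Nat) (h : r ≤ a.length) : pvAInner a r ≤ a.length := by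
  rw [pvAInner]
  split
  · rename_i hc; exact pvAInner_le a (r + 1) (by omega)
  · exact h
termination_by a.length - r
decreasing_by rename_i h'; omega

lemma pvAInner_stop (a : List Int) (r : Nat) :
    ¬ (pvAInner a r < a.length ∧ a.getD (pvAInner a r) 0 == 1) := by
  rw [pvAInner]
  split
  · exact pvAInner_stop a (r + 1)
  · rename_i h; exact h
termination_by a.length - r
decreasing_by rename_i h; omega

-- Folding B's step across the maximal run of 1s beginning at r.
lemma pvFold_inner (a : List Int) (r : Nat) (c j : Int) :
    List.foldl pvBStep (c, j) (a.drop r)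
      = List.foldl pvBStep
          (c + (↑(pvAInner a r - r)) * j + ↑(pvTri (pvAInner a r - r)),
           j + ↑(pvAInner a r - r))
          (a.drop (pvAInner a r)) := by
  rw [pvAInner]
  split
  · rename_i hc
    obtain ⟨hr, h1⟩ := hc
    have h1' : a.getD r 0 = 1 := by simpa using h1
    have hdrop : a.drop r = a[r] :: a.drop (r + 1) := List.drop_eq_getElem_cons hr
    have hget : a[r] = 1 := by rwa [List.getD_eq_getElem _ _ hr] at h1'
    rw [hdrop, hget, List.foldl_cons]
    have hstep : pvBStep (c, j) 1 = (c + (j + 1), j + 1) := by simp [pvBStep]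
    rw [hstep, pvFold_inner a (r + 1) (c + (j + 1)) (j + 1)]
    have hge : r + 1 ≤ pvAInner a (r + 1) := pvAInner_ge a (r + 1)
    set m := pvAInner a (r + 1) with hm
    have hk : m - r = (m - (r + 1)) + 1 := by omega
    have htri : pvTri ((m - (r + 1)) + 1) = pvTri (m - (r + 1)) + ((m - (r + 1)) + 1) := rfl
    rw [hk, htri]
    congr 1
    rw [Prod.mk.injEq]
    constructor <;> (push_cast; ring)
  · simp [pvTri]
termination_by a.length - r
decreasing_by rename_i h'; omega

-- If the first remaining element (if any) is not 1, the run component is irrelevant.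
lemma pvFold_run_irrel (t : List Int) (ht : t = [] ∨ ∃ x ts, t = x :: ts ∧ ¬ (x == 1))
    (c j j' : Int) : (List.foldl pvBStep (c, j) t).1 = (List.foldl pvBStep (c, j') t).1 := by
  rcases ht with h | ⟨x, ts, rfl, hx⟩
  · subst h; rfl
  · have hx' : ¬ x = 1 := by simpa using hx
    simp [List.foldl_cons, pvBStep, hx']

lemma pvAOuter_eq (a : List Int) (n : Nat) :
    ∀ r, a.length - r ≤ n → r ≤ a.length → ∀ count,
      pvAOuter a count r r = (List.foldl pvBStep (count, 0) (a.drop r)).1 := by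
  induction n with
  | zero =>
    intro r hn hr count
    have : r = a.length := by omega
    subst this
    rw [pvAOuter]
    simp
  | succ n ih =>
    intro r hn hr count
    rw [pvAOuter]
    by_cases hlt : r < a.length
    · rw [if_pos hlt]
      by_cases h1 : a.getD r 0 == 1
      · rw [if_pos h1]
        rw [pvFold_inner a r count 0]
        simp only [mul_zero, add_zero, zero_add]
        set r' := pvAInner a r with hr'
        have hge : r + 1 ≤ r' := by
          have h' : pvAInner a r = pvAInner a (r + 1) := by
            rw [pvAInner]; simp_all
          rw [hr', h']; exact pvAInner_ge a (r + 1)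
        have hle : r' ≤ a.length := by rw [hr']; exact pvAInner_le a r (le_of_lt hlt)
        have hstop : ¬ (r' < a.length ∧ a.getD r' 0 == 1) := by
          rw [hr']; exact pvAInner_stop a r
        have hrun : (List.foldl pvBStep
              (count + (↑(pvTri (r' - r)) : Int), (↑(r' - r) : Int))
              (a.drop r')).1
            = (List.foldl pvBStep
              (count + (↑(pvTri (r' - r)) : Int), (0 : Int))
              (a.drop r')).1 := by
          apply pvFold_run_irrel
          by_cases hend : r' < a.length
          · right
            refine ⟨a[r'], a.drop (r' + 1), List.drop_eq_getElem_cons hend, ?_⟩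
            intro hx
            exact hstop ⟨hend, by rw [List.getD_eq_getElem _ _ hend]; exact hx⟩
          · left
            have : a.length ≤ r' := by omega
            exact List.drop_eq_nil_of_le this
        rw [hrun]
        have hcast : (↑r' : Int) - ↑r = ↑(r' - r) := by omega
        have h2 : ((r' - r : Nat) : Int) * ((r' - r : Nat) + 1)
            = 2 * (pvTri (r' - r) : Int) := by
          exact_mod_cast (pvTri_two_mul (r' - r)).symm
        have hcount : count + ((↑r' : Int) - ↑r) * ((↑r' : Int) - ↑r + 1) / 2
            = count + (↑(pvTri (r' - r)) : Int) := by
          rw [hcast, h2]; omega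
        rw [hcount]
        exact ih r' (by omega) hle _
      · rw [if_neg h1]
        have hdrop : a.drop r = a[r] :: a.drop (r + 1) := List.drop_eq_getElem_cons hlt
        rw [hdrop, List.foldl_cons]
        have hget : ¬ a[r] = 1 := by
          rw [← List.getD_eq_getElem a 0 hlt]; simpa using h1
        have hstep : pvBStep (count, 0) a[r] = (count, 0) := by
          simp [pvBStep, hget]
        rw [hstep]
        exact ih (r + 1) (by omega) (by omega) count
    · rw [if_neg hlt]
      have : a.length ≤ r := by omega
      rw [List.drop_eq_nil_of_le this]
      rfl

-- ===== VERDICT (by name: the statement is the Claim_ definition above) =====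
theorem countSubArraysWithAllOnes_spec : Claim_equal_countSubArraysWithAllOnes := by
  intro a _
  unfold Spec_countSubArraysWithAllOnes countSubArraysWithAllOnes countSubArraysWithAllOnes_alt
  simpa using pvAOuter_eq a a.length 0 (by omega) (by omega) 0
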